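-- pv_equiv track=rewrite | github.com/sriinnu/LedgerFlow | ledgerflow/parsing.py | _receipt_template
-- ===== SOURCE A (Python) =====
-- def _receipt_template(lines: list[str]) -> str:
--     low_lines = [ln.lower() for ln in lines]
--     has_total = any("total" in ln for ln in low_lines)
--     has_vat = any(("vat" in ln or "tax" in ln) for ln in low_lines)
--     has_card = any(("card" in ln or "visa" in ln or "mastercard" in ln) for ln in low_lines)
--     if has_total and has_vat and has_card:
--         return "retail_pos_with_vat_and_card"
--     if has_total and has_vat:
--         return "retail_pos_with_vat"
--     if has_total:
--         return "simple_total_line"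
--     return "generic_receipt"
-- ===== SOURCE B (Python) =====
-- def _receipt_template(lines: list[str]) -> str:
--     # Single pass over the raw lines, lowercasing each once and updating
--     # three monotone flags; break early once all three are set.
--     has_total = has_vat = has_card = False
--     for ln in lines:
--         low = ln.lower()
--         has_total = has_total or "total" in low
--         has_vat = has_vat or "vat" in low or "tax" in low
--         has_card = has_card or "card" in low or "visa" in low or "mastercard" in low
--         if has_total and has_vat and has_card:
--             break
--     if has_total and has_vat and has_card:
--         return "retail_pos_with_vat_and_card"
--     if has_total and has_vat:
--         return "retail_pos_with_vat"
--     if has_total: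
--         return "simple_total_line"
--     return "generic_receipt"
-- ===== Notes on version B (the rewrite author's own statement) =====
-- stated objective: alternative
-- what changed: Replaces the intermediate lowercased list and three separate any() scans with one loop over the raw lines that lowercases each line once and maintains three monotone boolean flags, breaking early when all are set.
import Mathlib
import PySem

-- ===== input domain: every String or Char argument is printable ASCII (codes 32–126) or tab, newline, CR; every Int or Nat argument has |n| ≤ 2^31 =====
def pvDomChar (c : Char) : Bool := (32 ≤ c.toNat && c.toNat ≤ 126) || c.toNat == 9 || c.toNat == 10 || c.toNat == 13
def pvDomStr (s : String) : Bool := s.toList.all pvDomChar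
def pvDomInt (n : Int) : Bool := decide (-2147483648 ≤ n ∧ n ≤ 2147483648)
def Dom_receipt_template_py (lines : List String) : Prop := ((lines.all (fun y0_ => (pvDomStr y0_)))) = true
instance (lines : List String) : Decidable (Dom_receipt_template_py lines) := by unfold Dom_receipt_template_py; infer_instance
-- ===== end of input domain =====

-- B replaces A's lowered-list + three any() scans with one flag-updating loop with early break (alternative decomposition, same cost).


-- ===== PORT A =====
def receipt_template_py (lines : List String) : String :=
  let low_lines := lines.map PySem.Str.lower
  let has_total := low_lines.any (fun ln => PySem.Str.isIn "total" ln)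
  let has_vat := low_lines.any (fun ln => PySem.Str.isIn "vat" ln || PySem.Str.isIn "tax" ln)
  let has_card := low_lines.any (fun ln =>
    PySem.Str.isIn "card" ln || PySem.Str.isIn "visa" ln || PySem.Str.isIn "mastercard" ln)
  if has_total && has_vat && has_card then "retail_pos_with_vat_and_card"
  else if has_total && has_vat then "retail_pos_with_vat"
  else if has_total then "simple_total_line"
  else "generic_receipt"

-- ===== PORT B =====
-- the single pass of Source B: flags (t, v, c), early break once all three are set
def receiptAltLoop : List String → Bool → Bool → Bool → Bool × Bool × Bool
  | [], t, v, c => (t, v, c)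
  | ln :: rest, t, v, c =>
    let low := PySem.Str.lower ln
    let t' := t || PySem.Str.isIn "total" low
    let v' := v || PySem.Str.isIn "vat" low || PySem.Str.isIn "tax" low
    let c' := c || PySem.Str.isIn "card" low || PySem.Str.isIn "visa" low || PySem.Str.isIn "mastercard" low
    if t' && v' && c' then (t', v', c') else receiptAltLoop rest t' v' c'

def receipt_template_py_alt (lines : List String) : String :=
  let f := receiptAltLoop lines false false false
  if f.1 && f.2.1 && f.2.2 then "retail_pos_with_vat_and_card"
  else if f.1 && f.2.1 then "retail_pos_with_vat"
  else if f.1 then "simple_total_line"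
  else "generic_receipt"

-- ===== PRECONDITION & SPEC =====
def Spec_receipt_template_py (lines : List String) (out : String) : Prop := out = receipt_template_py_alt lines
instance (lines : List String) (out : String) : Decidable (Spec_receipt_template_py lines out) := by unfold Spec_receipt_template_py; infer_instance

-- ===== CLAIM (what is proved, stated in full; the proofs are below) =====
def Claim_equal_receipt_template_py : Prop := ∀ (lines : List String), Dom_receipt_template_py lines → Spec_receipt_template_py lines (receipt_template_py lines)

-- ===== LEMMAS AND PROOFS =====

-- generic form of Source B's loop: three predicate flags with early break
def flagLoop (p q r : String → Bool) : List String → Bool → Bool → Bool → Bool × Bool × Bool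
  | [], t, v, c => (t, v, c)
  | ln :: rest, t, v, c =>
    let t' := t || p ln
    let v' := v || q ln
    let c' := c || r ln
    if t' && v' && c' then (t', v', c') else flagLoop p q r rest t' v' c'

theorem flagLoop_eq (p q r : String → Bool) (lines : List String) (t v c : Bool) :
    flagLoop p q r lines t v c = (t || lines.any p, v || lines.any q, c || lines.any r) := by
  induction lines generalizing t v c with
  | nil => simp [flagLoop]
  | cons ln rest ih =>
    simp only [flagLoop, List.any_cons]
    split
    · rename_i h
      simp only [Bool.and_eq_true, Bool.or_eq_true] at h
      simp only [Prod.mk.injEq]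
      refine ⟨?_, ?_, ?_⟩ <;> (rw [Bool.eq_iff_iff]; simp only [Bool.or_eq_true]; tauto)
    · rw [ih]; simp [Bool.or_assoc]

theorem receiptAltLoop_eq_flagLoop (lines : List String) (t v c : Bool) :
    receiptAltLoop lines t v c =
      flagLoop (fun ln => PySem.Str.isIn "total" (PySem.Str.lower ln))
        (fun ln => PySem.Str.isIn "vat" (PySem.Str.lower ln) || PySem.Str.isIn "tax" (PySem.Str.lower ln))
        (fun ln => PySem.Str.isIn "card" (PySem.Str.lower ln) || (PySem.Str.isIn "visa" (PySem.Str.lower ln) || PySem.Str.isIn "mastercard" (PySem.Str.lower ln)))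
        lines t v c := by
  induction lines generalizing t v c with
  | nil => rfl
  | cons ln rest ih =>
    simp only [receiptAltLoop, flagLoop, Bool.or_assoc]
    split
    · rfl
    · rw [ih]

-- ===== VERDICT (by name: the statement is the Claim_ definition above) =====

theorem receipt_template_py_spec : Claim_equal_receipt_template_py := by
  intro lines _
  unfold Spec_receipt_template_py receipt_template_py receipt_template_py_alt
  rw [receiptAltLoop_eq_flagLoop, flagLoop_eq]
  simp [List.any_map, Function.comp, or_assoc]
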